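-- pv_equiv track=rewrite | github.com/sami-bre/grokking_algorithms | quicksort(DivideAndConqure)/dividingFarmland.py | divideFarmland
-- ===== SOURCE A (Python) =====
-- def divideFarmland(land):
--     """takes a land / (width, length) and returns the dimension of the largest squares to divide the land"""
--     # get the longerSide ans shorterSide
--     if land[0] > land[1]:
--         longerSide, shorterSide = land[0], land[1]
--     else:
--         longerSide, shorterSide = land[1], land[0]
--
--     # base case and recursive case
--     if longerSide % shorterSide == 0:
--         return shorterSide
--     else:
--         return divideFarmland((longerSide % shorterSide, shorterSide))
-- ===== SOURCE B (Python) =====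
-- def divideFarmland(land):
--     """takes a land / (width, length) and returns the dimension of the largest squares to divide the land"""
--     a, b = (land[0], land[1]) if land[0] > land[1] else (land[1], land[0])
--     while a % b != 0:
--         a, b = b, a % b
--     return b
-- ===== Notes on version B (the rewrite author's own statement) =====
-- stated objective: simpler
-- what changed: Replaces A's recursion (rebuilding a tuple and re-splitting it into longer/shorter on every call) with a flat iterative Euclidean loop over two running values.
import Mathlib
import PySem

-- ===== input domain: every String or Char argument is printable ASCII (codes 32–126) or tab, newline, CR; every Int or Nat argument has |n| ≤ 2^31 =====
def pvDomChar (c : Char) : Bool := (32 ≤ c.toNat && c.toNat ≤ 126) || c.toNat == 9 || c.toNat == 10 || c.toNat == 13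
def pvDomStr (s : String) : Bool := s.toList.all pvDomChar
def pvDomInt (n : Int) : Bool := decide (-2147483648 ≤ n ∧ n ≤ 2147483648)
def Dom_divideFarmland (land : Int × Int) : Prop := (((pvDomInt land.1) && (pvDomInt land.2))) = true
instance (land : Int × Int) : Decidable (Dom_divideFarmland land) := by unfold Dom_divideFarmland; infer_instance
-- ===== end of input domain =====

-- B replaces A's tuple-rebuilding recursion with a flat iterative Euclidean loop (objective: simpler).


-- ===== PORT A =====
-- A's recursion ported with a fuel parameter; under Pre_ the fuel is never exhausted
-- (the shorter side strictly decreases and stays positive).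
def divideFarmlandGo (fuel : Nat) (land : Int × Int) : Int :=
  match fuel with
  | 0 => 0
  | fuel + 1 =>
    let longerSide := if land.1 > land.2 then land.1 else land.2
    let shorterSide := if land.1 > land.2 then land.2 else land.1
    if PySem.Int.mod longerSide shorterSide = 0 then shorterSide
    else divideFarmlandGo fuel (PySem.Int.mod longerSide shorterSide, shorterSide)

def divideFarmland (land : Int × Int) : Int :=
  divideFarmlandGo (land.1.natAbs + land.2.natAbs + 1) land

-- ===== PORT B =====
-- B's while-loop over the two running values a, b; fuel as above.
def divideFarmlandAltLoop (fuel : Nat) (a b : Int) : Int :=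
  match fuel with
  | 0 => 0
  | fuel + 1 =>
    if PySem.Int.mod a b ≠ 0 then divideFarmlandAltLoop fuel b (PySem.Int.mod a b)
    else b

def divideFarmland_alt (land : Int × Int) : Int :=
  let a := if land.1 > land.2 then land.1 else land.2
  let b := if land.1 > land.2 then land.2 else land.1
  divideFarmlandAltLoop (land.1.natAbs + land.2.natAbs + 1) a b

-- ===== PRECONDITION & SPEC =====
-- Pre_ is exactly the set of inputs on which A returns: with a zero side A raises
-- ZeroDivisionError, and with a negative shorter side A diverges unless the shorter side
-- divides the longer one (then it returns in one step).
def Pre_divideFarmland (land : Int × Int) : Prop :=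
  (0 < land.1 ∧ 0 < land.2) ∨ (min land.1 land.2 < 0 ∧ min land.1 land.2 ∣ max land.1 land.2)
instance (land : Int × Int) : Decidable (Pre_divideFarmland land) := by unfold Pre_divideFarmland; infer_instance
def pvWitness_divideFarmland : (Int × Int) := (12, 18)

def Spec_divideFarmland (land : Int × Int) (out : Int) : Prop := out = divideFarmland_alt land
instance (land : Int × Int) (out : Int) : Decidable (Spec_divideFarmland land out) := by unfold Spec_divideFarmland; infer_instance

-- ===== CLAIM (what is proved, stated in full; the proofs are below) =====
def Claim_equal_divideFarmland : Prop := ∀ (land : Int × Int), Dom_divideFarmland land → Pre_divideFarmland land → Spec_divideFarmland land (divideFarmland land)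

-- ===== LEMMAS AND PROOFS =====

-- Core: A's recursion and B's loop agree once we have enough fuel on both sides.
-- Measure n bounds the smaller side; one reduction step shrinks it strictly.
lemma go_eq_loop : ∀ (n : Nat) (f₁ f₂ : Nat) (a b : Int), 0 < a → 0 < b →
    (min a b).natAbs ≤ n → n < f₁ → n < f₂ →
    divideFarmlandGo f₁ (a, b) =
      divideFarmlandAltLoop f₂ (if a > b then a else b) (if a > b then b else a) := by
  intro n
  induction n using Nat.strong_induction_on with
  | _ n ih =>
    intro f₁ f₂ a b ha hb hn h₁ h₂
    obtain ⟨f₁, rfl⟩ : ∃ k, f₁ = k + 1 := ⟨f₁ - 1, by omega⟩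
    obtain ⟨f₂, rfl⟩ : ∃ k, f₂ = k + 1 := ⟨f₂ - 1, by omega⟩
    set l := if a > b then a else b with hl
    set s := if a > b then b else a with hs
    have hspos : 0 < s := by simp only [hs]; split <;> assumption
    have hsl : s ≤ l := by simp only [hl, hs]; split <;> omega
    simp only [divideFarmlandGo, divideFarmlandAltLoop, ← hl, ← hs]
    by_cases hz : PySem.Int.mod l s = 0
    · simp [hz]
    · simp only [hz, ne_eq, not_false_eq_true, if_pos]
      set m := PySem.Int.mod l s with hm
      have hm0 : 0 ≤ m := PySem.Int.mod_nonneg l hspos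
      have hms : m < s := PySem.Int.mod_lt l hspos
      have hmpos : 0 < m := lt_of_le_of_ne hm0 (Ne.symm hz)
      have hcall := ih (min m s).natAbs (by
          have : (min a b).natAbs = s.natAbs := by
            simp only [hs]; split <;> simp [min_def] <;> omega
          have : (min m s).natAbs < s.natAbs := by
            have : min m s = m := by omega
            rw [this]; omega
          omega)
        f₁ f₂ m s hmpos hspos le_rfl (by
          have : (min m s).natAbs < (min a b).natAbs := by
            have h1 : min m s = m := by omega
            have h2 : min a b = s := by simp only [hs]; split <;> simp [min_def] <;> omega
            rw [h1, h2]; omega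
          omega) (by
          have : (min m s).natAbs < (min a b).natAbs := by
            have h1 : min m s = m := by omega
            have h2 : min a b = s := by simp only [hs]; split <;> simp [min_def] <;> omega
            rw [h1, h2]; omega
          omega)
      rw [hcall]
      have : ¬ (m > s) := by omega
      simp [this]

-- ===== VERDICT (by name: the statement is the Claim_ definition above) =====
theorem divideFarmland_spec : Claim_equal_divideFarmland := by
  intro land _ hpre
  obtain ⟨a, b⟩ := land
  show divideFarmland (a, b) = divideFarmland_alt (a, b)
  rcases hpre with ⟨ha, hb⟩ | ⟨hmin, hdvd⟩
  · unfold divideFarmland divideFarmland_alt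
    exact go_eq_loop (min a b).natAbs _ _ a b ha hb le_rfl (by simp [min_def]; omega)
      (by simp [min_def]; omega)
  · -- the shorter side is negative and divides the longer one: both return it in one step
    have hz : PySem.Int.mod (if a > b then a else b) (if a > b then b else a) = 0 := by
      rw [PySem.Int.mod_eq_zero_iff_dvd]
      have h1 : (if a > b then b else a) = min a b := by split <;> simp [min_def] <;> omega
      have h2 : (if a > b then a else b) = max a b := by split <;> simp [max_def] <;> omega
      rw [h1, h2]; exact hdvd
    unfold divideFarmland divideFarmland_alt divideFarmlandGo divideFarmlandAltLoop
    simp [hz]
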